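-- pv_equiv track=rewrite | github.com/bellanda/LibreChat | cron/utils/database/tns_parser.py | _get_tns_entries
-- ===== SOURCE A (Python) =====
-- from typing import Dict, List, Optional
--
-- def _get_tns_entries(tns_lines: List[str]) -> List[List[str]]:
--     """Break into individual TNS entries."""
--     list_of_entries = []
--     curr_entry = None
--
--     for input_line in tns_lines:
--         if len(input_line) > 0:
--             if input_line[0] != " " and input_line[0] != "\t" and input_line[0] != "(" and input_line[0] != ")":
--                 # New TNS entry
--                 if curr_entry is not None:
--                     # Save previous entry
--                     list_of_entries.append(curr_entry)
--                 # Start new entry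
--                 curr_entry = [input_line]
--             else:
--                 # Another line in current entry
--                 if curr_entry is not None:
--                     curr_entry.append(input_line)
--
--     if curr_entry is not None:
--         # Save last entry
--         list_of_entries.append(curr_entry)
--
--     return list_of_entries
-- ===== SOURCE B (Python) =====
-- from typing import Dict, List, Optional
--
-- def _get_tns_entries(tns_lines: List[str]) -> List[List[str]]:
--     """Break into individual TNS entries (back-to-front: walk the lines in
--     reverse, collecting continuation lines into a tail until a header line
--     closes the entry; lines before the first header drop out naturally)."""
--     entries_rev = []
--     tail_rev = []
--     for line in reversed(tns_lines):
--         if line: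
--             if line[0] in " \t()":
--                 tail_rev.append(line)
--             else:
--                 entries_rev.append([line] + tail_rev[::-1])
--                 tail_rev = []
--     entries_rev.reverse()
--     return entries_rev
-- ===== Notes on version B (the rewrite author's own statement) =====
-- stated objective: alternative
-- what changed: Replaces A's forward state machine with an Optional current-entry accumulator by a backward pass: walking the lines in reverse, collecting continuation lines into a tail and emitting an entry whenever a header line is reached, then reversing the collected entries.
import Mathlib
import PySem

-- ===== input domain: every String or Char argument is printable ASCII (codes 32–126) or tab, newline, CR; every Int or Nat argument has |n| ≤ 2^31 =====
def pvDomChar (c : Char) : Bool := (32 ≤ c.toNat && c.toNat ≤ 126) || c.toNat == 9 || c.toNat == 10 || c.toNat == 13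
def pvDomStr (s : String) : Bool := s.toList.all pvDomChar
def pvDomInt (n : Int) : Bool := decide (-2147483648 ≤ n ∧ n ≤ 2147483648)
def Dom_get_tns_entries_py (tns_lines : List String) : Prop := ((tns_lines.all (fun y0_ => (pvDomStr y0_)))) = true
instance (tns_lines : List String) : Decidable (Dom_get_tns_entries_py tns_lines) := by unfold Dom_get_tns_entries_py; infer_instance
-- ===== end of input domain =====

-- B groups the lines back-to-front (reverse walk collecting a tail until each header closes an
-- entry) instead of A's forward state machine with an optional current entry; objective: alternative.

-- ===== PORT A =====
-- loop body of A: state = (list_of_entries, curr_entry)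
def aStep (st : List (List String) × Option (List String)) (line : String) :
    List (List String) × Option (List String) :=
  match line.toList with
  | [] => st                                -- len(input_line) == 0 : skipped
  | c :: _ =>
    if c ≠ ' ' ∧ c ≠ '\t' ∧ c ≠ '(' ∧ c ≠ ')' then
      -- new TNS entry: save previous (if any), start new
      match st.2 with
      | some cur => (st.1 ++ [cur], some [line])
      | none => (st.1, some [line])
    else
      -- another line in current entry
      (st.1, st.2.map (fun cur => cur ++ [line]))

def get_tns_entries_py (tns_lines : List String) : List (List String) :=
  let st := tns_lines.foldl aStep ([], none)
  match st.2 with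
  | some cur => st.1 ++ [cur]               -- save last entry
  | none => st.1

-- ===== PORT B =====
-- loop body of B: state = (entries_rev, tail_rev), lines visited in reverse
def bStep (st : List (List String) × List String) (line : String) :
    List (List String) × List String :=
  match line.toList with
  | [] => st                                -- `if line:` failed : skipped
  | c :: _ =>
    if c = ' ' ∨ c = '\t' ∨ c = '(' ∨ c = ')' then
      (st.1, st.2 ++ [line])                -- tail_rev.append(line)
    else
      (st.1 ++ [line :: st.2.reverse], [])  -- entries_rev.append([line] + tail_rev[::-1])

def get_tns_entries_py_alt (tns_lines : List String) : List (List String) :=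
  ((tns_lines.reverse).foldl bStep ([], [])).1.reverse

-- ===== PRECONDITION & SPEC =====
def Spec_get_tns_entries_py (tns_lines : List String) (out : List (List String)) : Prop := out = get_tns_entries_py_alt tns_lines
instance (tns_lines : List String) (out : List (List String)) : Decidable (Spec_get_tns_entries_py tns_lines out) := by unfold Spec_get_tns_entries_py; infer_instance

-- ===== CLAIM (what is proved, stated in full; the proofs are below) =====
def Claim_equal_get_tns_entries_py : Prop := ∀ (tns_lines : List String), Dom_get_tns_entries_py tns_lines → Spec_get_tns_entries_py tns_lines (get_tns_entries_py tns_lines)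

-- ===== LEMMAS AND PROOFS =====

-- reference grouping, computed right-to-left: (entries, pending tail of continuation lines)
def refGroup : List String → List (List String) × List String
  | [] => ([], [])
  | line :: rest =>
    let p := refGroup rest
    match line.toList with
    | [] => p
    | c :: _ =>
      if c = ' ' ∨ c = '\t' ∨ c = '(' ∨ c = ')' then (p.1, line :: p.2)
      else ((line :: p.2) :: p.1, [])

lemma bFold_eq (l : List String) :
    (l.reverse).foldl bStep ([], []) = ((refGroup l).1.reverse, (refGroup l).2.reverse) := by
  rw [List.foldl_reverse]
  induction l with
  | nil => rfl
  | cons line rest ih =>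
    simp only [List.foldr_cons, ih, refGroup]
    cases h : line.toList with
    | nil => simp [bStep, h]
    | cons c cs =>
      by_cases hc : c = ' ' ∨ c = '\t' ∨ c = '(' ∨ c = ')'
      · simp [bStep, h, hc]
      · simp [bStep, h, hc]

-- what A's fold computes, for any starting state, in terms of refGroup
lemma aFold_eq (l : List String) (es : List (List String)) (cur : Option (List String)) :
    (match (l.foldl aStep (es, cur)).2 with
     | some c => (l.foldl aStep (es, cur)).1 ++ [c]
     | none => (l.foldl aStep (es, cur)).1) =
    es ++ (match cur with
           | none => (refGroup l).1
           | some c => (c ++ (refGroup l).2) :: (refGroup l).1) := by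
  induction l generalizing es cur with
  | nil => cases cur <;> simp [refGroup]
  | cons line rest ih =>
    simp only [List.foldl_cons, refGroup]
    cases h : line.toList with
    | nil =>
      have : aStep (es, cur) line = (es, cur) := by simp [aStep, h]
      rw [this, ih]
    | cons c cs =>
      by_cases hc : c = ' ' ∨ c = '\t' ∨ c = '(' ∨ c = ')'
      · have hneg : ¬ (c ≠ ' ' ∧ c ≠ '\t' ∧ c ≠ '(' ∧ c ≠ ')') := by tauto
        have : aStep (es, cur) line = (es, cur.map (fun m => m ++ [line])) := by
          simp [aStep, h, hneg]
        rw [this, ih]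
        cases cur with
        | none => simp [hc]
        | some m => simp [hc]
      · have hpos : c ≠ ' ' ∧ c ≠ '\t' ∧ c ≠ '(' ∧ c ≠ ')' := by tauto
        cases cur with
        | none =>
          have : aStep (es, none) line = (es, some [line]) := by simp [aStep, h, hpos]
          rw [this, ih]; simp [hc]
        | some m =>
          have : aStep (es, some m) line = (es ++ [m], some [line]) := by
            simp [aStep, h, hpos]
          rw [this, ih]; simp [hc]

-- ===== VERDICT (by name: the statement is the Claim_ definition above) =====
theorem get_tns_entries_py_spec : Claim_equal_get_tns_entries_py := by
  intro l _
  show get_tns_entries_py l = get_tns_entries_py_alt l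
  unfold get_tns_entries_py get_tns_entries_py_alt
  rw [bFold_eq]
  simpa using aFold_eq l [] none
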